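-- pv_equiv track=rewrite | github.com/George91369136/Bugalteria1 | main.py | _group_thousands
-- ===== SOURCE A (Python) =====
-- def _group_thousands(num: str) -> str:
--     if not num:
--         return "0"
--     out = []
--     i = len(num)
--     while i > 0:
--         j = max(0, i - 3)
--         out.append(num[j:i])
--         i = j
--     return ".".join(reversed(out))
-- ===== SOURCE B (Python) =====
-- def _group_thousands(num: str) -> str:
--     if not num:
--         return "0"
--     n = len(num)
--     parts = []
--     for i, ch in enumerate(num):
--         if i != 0 and (n - i) % 3 == 0:
--             parts.append(".")
--         parts.append(ch)
--     return "".join(parts)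
-- ===== Notes on version B (the rewrite author's own statement) =====
-- stated objective: alternative
-- what changed: B replaces A's backwards 3-char slicing loop plus reversed-join with a single forward pass over enumerate(num) that inserts a dot separator whenever the remaining length is a positive multiple of 3.
import Mathlib
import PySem

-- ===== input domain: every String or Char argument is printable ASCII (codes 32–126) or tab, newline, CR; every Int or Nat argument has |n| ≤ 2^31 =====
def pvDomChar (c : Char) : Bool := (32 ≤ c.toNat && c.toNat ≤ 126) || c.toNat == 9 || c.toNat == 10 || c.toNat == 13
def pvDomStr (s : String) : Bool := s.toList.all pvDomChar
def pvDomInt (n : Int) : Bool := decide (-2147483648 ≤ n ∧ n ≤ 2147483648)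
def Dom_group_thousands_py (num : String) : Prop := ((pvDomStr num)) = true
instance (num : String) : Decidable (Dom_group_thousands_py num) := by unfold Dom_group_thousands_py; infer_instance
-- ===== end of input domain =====

-- B replaces A's backwards 3-char slicing loop + reversed join by one forward pass
-- inserting a dot separator where the remaining length is a positive multiple of 3 (alternative decomposition, same cost).

-- ===== PORT A =====
-- the while loop: i counts down, j = max(0, i-3) is Nat subtraction i - 3
def pvLoopA (s : List Char) : Nat → List (List Char) → List (List Char)
  | 0, out => out
  | i+1, out =>
      pvLoopA s (i + 1 - 3)
        (out ++ [PySem.List.slice s (some ((i + 1 - 3 : Nat) : Int)) (some ((i + 1 : Nat) : Int))])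
  decreasing_by omega

def group_thousands_py (num : String) : String :=
  if num.toList = [] then "0"
  else String.ofList (PySem.Chars.join ['.'] ((pvLoopA num.toList num.toList.length []).reverse))

-- ===== PORT B =====
def group_thousands_py_alt (num : String) : String :=
  if num.toList = [] then "0"
  else
    let n : Int := (num.toList.length : Int)
    let parts : List (List Char) :=
      (PySem.List.enumerate num.toList 0).foldl
        (fun acc p =>
          (if p.1 ≠ 0 ∧ PySem.Int.mod (n - p.1) 3 = 0 then acc ++ [['.']] else acc) ++ [[p.2]])
        []
    String.ofList (PySem.Chars.join [] parts)

-- ===== PRECONDITION & SPEC =====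
def Spec_group_thousands_py (num : String) (out : String) : Prop := out = group_thousands_py_alt num
instance (num : String) (out : String) : Decidable (Spec_group_thousands_py num out) := by unfold Spec_group_thousands_py; infer_instance

-- ===== CLAIM (what is proved, stated in full; the proofs are below) =====
def Claim_equal_group_thousands_py : Prop := ∀ (num : String), Dom_group_thousands_py num → Spec_group_thousands_py num (group_thousands_py num)

-- ===== LEMMAS AND PROOFS =====

-- gB n p is what B contributes for one enumerated character p
def gB (n : Int) (p : Int × Char) : List Char :=
  (if p.1 ≠ 0 ∧ PySem.Int.mod (n - p.1) 3 = 0 then ['.'] else []) ++ [p.2]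

lemma pvLoopA_acc (s : List Char) (i : Nat) (out : List (List Char)) :
    pvLoopA s i out = out ++ pvLoopA s i [] := by
  induction i using Nat.strong_induction_on generalizing out with
  | _ i ih =>
    match i with
    | 0 => simp [pvLoopA]
    | i+1 =>
      rw [pvLoopA, pvLoopA]
      rw [ih (i+1-3) (by omega) ([] ++ [_]), ih (i+1-3) (by omega) (out ++ [_])]
      simp

lemma pvLoopA_succ (s : List Char) (i : Nat) :
    pvLoopA s (i+1) [] =
      PySem.List.slice s (some ((i + 1 - 3 : Nat) : Int)) (some ((i + 1 : Nat) : Int))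
        :: pvLoopA s (i + 1 - 3) [] := by
  rw [pvLoopA, pvLoopA_acc]
  simp

lemma pvLoopA_ne_nil (s : List Char) (i : Nat) (h : 0 < i) : pvLoopA s i [] ≠ [] := by
  match i with
  | i+1 => rw [pvLoopA_succ]; simp

lemma pvLoopA_take (s : List Char) (m : Nat) :
    ∀ i, i ≤ m → pvLoopA (s.take m) i [] = pvLoopA s i [] := by
  intro i
  induction i using Nat.strong_induction_on with
  | _ i ih =>
    match i with
    | 0 => intro _; simp [pvLoopA]
    | i+1 =>
      intro him
      rw [pvLoopA_succ, pvLoopA_succ, ih (i+1-3) (by omega) (by omega)]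
      congr 1
      rw [PySem.List.slice_natCast, PySem.List.slice_natCast, List.drop_take]
      rw [List.take_take]
      congr 1
      omega

lemma join_append_singleton (d : List Char) (xs : List (List Char)) (c : List Char) (h : xs ≠ []) :
    PySem.Chars.join d (xs ++ [c]) = PySem.Chars.join d xs ++ d ++ c := by
  induction xs with
  | nil => simp at h
  | cons a t ih =>
    match t with
    | [] => simp [PySem.Chars.join_cons_cons, PySem.Chars.join_singleton]
    | b :: t' =>
      have := ih (by simp)
      simp only [List.cons_append] at this ⊢
      rw [PySem.Chars.join_cons_cons, PySem.Chars.join_cons_cons, this]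
      simp

lemma join_nil_flatten (ps : List (List Char)) : PySem.Chars.join [] ps = ps.flatten := by
  induction ps with
  | nil => simp [PySem.Chars.join_nil]
  | cons a t ih =>
    match t with
    | [] => simp [PySem.Chars.join_singleton]
    | b :: t' => rw [PySem.Chars.join_cons_cons]; simp [ih]

lemma mod3_sub (a : Int) : PySem.Int.mod (a + 3) 3 = PySem.Int.mod a 3 := by
  simp [PySem.Int.mod]

lemma flatMap_congr_mem {α β : Type} (xs : List α) (g g' : α → List β)
    (h : ∀ p ∈ xs, g p = g' p) : xs.flatMap g = xs.flatMap g' := by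
  induction xs with
  | nil => simp
  | cons a t ih =>
    rw [List.flatMap_cons, List.flatMap_cons, h a (by simp),
      ih (fun p hp => h p (by simp [hp]))]

lemma flat_singleton (xs : List (Int × Char)) (g : Int × Char → List Char)
    (h : ∀ p ∈ xs, g p = [p.2]) : xs.flatMap g = xs.map (·.2) := by
  induction xs with
  | nil => simp
  | cons a t ih =>
    rw [List.flatMap_cons, h a (by simp), ih (fun p hp => h p (by simp [hp]))]
    simp

lemma gB_small (l : List Char) (hle : l.length ≤ 3) :
    ∀ p ∈ PySem.List.enumerate l 0, gB (l.length : Int) p = [p.2] := by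
  intro p hp
  rw [PySem.List.mem_enumerate_iff] at hp
  obtain ⟨k, hk, rfl⟩ := hp
  unfold gB
  rw [if_neg]
  · simp
  · rintro ⟨h0, hmod⟩
    unfold PySem.Int.mod at hmod
    rw [Int.fmod_eq_emod] at hmod
    simp only [zero_add] at h0 hmod
    simp at hmod
    omega

-- MAIN: A's joined chunks equal B's flatMap, for nonempty l
lemma main_eq_aux (N : Nat) : ∀ (l : List Char), l.length ≤ N → l ≠ [] →
    PySem.Chars.join ['.'] ((pvLoopA l l.length []).reverse)
      = (PySem.List.enumerate l 0).flatMap (gB (l.length : Int)) := by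
  induction N with
  | zero => intro l hN hne; simp at hN; exact absurd hN hne
  | succ N ih =>
    intro l hN hne
    by_cases h3 : l.length ≤ 3
    · -- one chunk: the whole string, no separators
      obtain ⟨m, hm⟩ : ∃ m, l.length = m + 1 :=
        ⟨l.length - 1, by have := List.length_pos_of_ne_nil hne; omega⟩
      rw [flat_singleton _ _ (gB_small l h3), PySem.List.map_snd_enumerate]
      rw [hm, pvLoopA_succ]
      have h0 : m + 1 - 3 = 0 := by omega
      rw [h0]
      simp only [pvLoopA]
      rw [PySem.List.slice_natCast]
      simp only [List.drop_zero, Nat.sub_zero, List.reverse_cons, List.reverse_nil,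
        List.nil_append]
      rw [PySem.Chars.join_singleton, ← hm, List.take_length]
    · -- peel the last three characters
      rw [Nat.not_le] at h3
      set n := l.length with hn
      set t := l.take (n - 3) with htdef
      set u := l.drop (n - 3) with hudef
      have htu : l = t ++ u := (List.take_append_drop _ _).symm
      have hlt : t.length = n - 3 := by simp [htdef]; omega
      have hlu : u.length = 3 := by simp [hudef]; omega
      have htne : t ≠ [] := by
        intro hc; rw [hc] at hlt; simp at hlt; omega
      -- A side
      obtain ⟨m, hm⟩ : ∃ m, n = m + 1 := ⟨n - 1, by omega⟩
      have hchunk : pvLoopA l n [] =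
          u :: pvLoopA t t.length [] := by
        rw [hm, pvLoopA_succ]
        have h1 : m + 1 - 3 = n - 3 := by omega
        rw [h1]
        congr 1
        · rw [PySem.List.slice_natCast, ← hudef, ← hm]
          have : n - (n - 3) = 3 := by omega
          rw [this, ← hlu, List.take_length]
        · rw [hlt, htdef, pvLoopA_take l (n-3) (n-3) le_rfl]
      have hArec : PySem.Chars.join ['.'] ((pvLoopA l n []).reverse)
          = PySem.Chars.join ['.'] ((pvLoopA t t.length []).reverse) ++ ['.'] ++ u := by
        rw [hchunk, List.reverse_cons]
        exact join_append_singleton _ _ _ (by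
          simp only [ne_eq, List.reverse_eq_nil_iff]
          exact pvLoopA_ne_nil t t.length (by omega))
      rw [hArec, ih t (by omega) htne]
      -- B side
      conv_rhs => rw [htu]
      rw [PySem.List.enumerate_append, List.flatMap_append]
      simp only [zero_add]
      have hpre : List.flatMap (gB ((n : Nat) : Int)) (PySem.List.enumerate t 0)
          = List.flatMap (gB ((t.length : Nat) : Int)) (PySem.List.enumerate t 0) := by
        apply flatMap_congr_mem
        intro p hp
        rw [PySem.List.mem_enumerate_iff] at hp
        obtain ⟨k, hk, rfl⟩ := hp
        unfold gB
        rw [hlt] at hk ⊢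
        have harith : ((n : Int) - (0 + (k : Int))) = (((n - 3 : Nat) : Int) - (0 + (k : Int))) + 3 := by
          omega
        rw [harith, mod3_sub]
      have hsuf : List.flatMap (gB ((n : Nat) : Int)) (PySem.List.enumerate u (t.length : Int))
          = '.' :: u := by
        obtain ⟨a, b, c, habc⟩ := List.length_eq_three.mp hlu
        rw [habc, hlt]
        rw [PySem.List.enumerate_cons, PySem.List.enumerate_cons,
          PySem.List.enumerate_cons, PySem.List.enumerate_nil]
        simp only [List.flatMap_cons, List.flatMap_nil]
        have e1 : ((n : Int) - ((n - 3 : Nat) : Int)) = 3 := by omega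
        have e2 : ((n : Int) - (((n - 3 : Nat) : Int) + 1)) = 2 := by omega
        have e3 : ((n : Int) - ((((n - 3 : Nat) : Int) + 1) + 1)) = 1 := by omega
        unfold gB
        simp only [e1, e2, e3]
        have hne0 : (((n - 3 : Nat) : Int)) ≠ 0 := by
          have : 3 < n := h3
          simp
          omega
        rw [if_pos ⟨hne0, by decide⟩,
          if_neg (by rintro ⟨-, hmod⟩; simp [PySem.Int.mod] at hmod),
          if_neg (by rintro ⟨-, hmod⟩; simp [PySem.Int.mod] at hmod)]
        simp
      rw [hpre, hsuf]
      simp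

lemma main_eq (l : List Char) (h : l ≠ []) :
    PySem.Chars.join ['.'] ((pvLoopA l l.length []).reverse)
      = (PySem.List.enumerate l 0).flatMap (gB (l.length : Int)) :=
  main_eq_aux l.length l le_rfl h

lemma alt_parts (xs : List (Int × Char)) (n : Int) (acc : List (List Char)) :
    xs.foldl
        (fun acc p =>
          (if p.1 ≠ 0 ∧ PySem.Int.mod (n - p.1) 3 = 0 then acc ++ [['.']] else acc) ++ [[p.2]])
        acc
      = acc ++ xs.flatMap
          (fun p => (if p.1 ≠ 0 ∧ PySem.Int.mod (n - p.1) 3 = 0 then [['.']] else []) ++ [[p.2]]) := by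
  induction xs generalizing acc with
  | nil => simp
  | cons x t ih =>
    rw [List.foldl_cons, ih]
    rw [List.flatMap_cons]
    split_ifs <;> simp

lemma flatten_parts (xs : List (Int × Char)) (n : Int) :
    (xs.flatMap (fun p => (if p.1 ≠ 0 ∧ PySem.Int.mod (n - p.1) 3 = 0 then [['.']] else []) ++ [[p.2]])).flatten
      = xs.flatMap (gB n) := by
  induction xs with
  | nil => simp
  | cons a t ih =>
    rw [List.flatMap_cons, List.flatMap_cons, List.flatten_append, ih]
    congr 1
    unfold gB
    split_ifs <;> simp

-- ===== VERDICT (by name: the statement is the Claim_ definition above) =====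
theorem group_thousands_py_spec : Claim_equal_group_thousands_py := by
  intro num _
  unfold Spec_group_thousands_py group_thousands_py group_thousands_py_alt
  by_cases hnil : num.toList = []
  · rw [if_pos hnil, if_pos hnil]
  · rw [if_neg hnil, if_neg hnil]
    dsimp only
    congr 1
    rw [alt_parts, List.nil_append, join_nil_flatten, flatten_parts,
      main_eq num.toList hnil]
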